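-- pv_equiv track=rewrite | github.com/OpenPecha/milvus_segment_generator | src/milvus_segment_generator/segmentation/base.py | _find_split_end
-- ===== SOURCE A (Python) =====
-- from typing import List, Tuple
--
-- def _find_split_end(segment_text: str, start: int, candidate_end: int, delimiters: Tuple[str, ...]) -> int:
--     """Choose a split end <= candidate_end, preferring delimiters and whitespace."""
--     delimiter_set = set(delimiters)
--
--     for pos in range(candidate_end, start, -1):
--         if segment_text[pos - 1] in delimiter_set:
--             return pos
--
--     for pos in range(candidate_end, start, -1):
--         if segment_text[pos - 1].isspace():
--             return pos
--
--     return candidate_end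
-- ===== SOURCE B (Python) =====
-- def _find_split_end(segment_text: str, start: int, candidate_end: int, delimiters) -> int:
--     """Choose a split end <= candidate_end, preferring delimiters and whitespace."""
--     delimiter_set = set(delimiters)
--     ws_pos = None
--     for pos in range(candidate_end, start, -1):
--         ch = segment_text[pos - 1]
--         if ch in delimiter_set:
--             return pos
--         if ws_pos is None and ch.isspace():
--             ws_pos = pos
--     return ws_pos if ws_pos is not None else candidate_end
-- ===== Notes on version B (the rewrite author's own statement) =====
-- stated objective: alternative
-- what changed: Replaces A's two full backward scans (one for delimiters, then a second from scratch for whitespace) by a single backward scan that returns on a delimiter immediately and remembers the rightmost whitespace as a fallback.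
-- outside the precondition, e.g. on _find_split_end('a.', -5, 2, ('.',)): A returns 2, B returns 2
import Mathlib
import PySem

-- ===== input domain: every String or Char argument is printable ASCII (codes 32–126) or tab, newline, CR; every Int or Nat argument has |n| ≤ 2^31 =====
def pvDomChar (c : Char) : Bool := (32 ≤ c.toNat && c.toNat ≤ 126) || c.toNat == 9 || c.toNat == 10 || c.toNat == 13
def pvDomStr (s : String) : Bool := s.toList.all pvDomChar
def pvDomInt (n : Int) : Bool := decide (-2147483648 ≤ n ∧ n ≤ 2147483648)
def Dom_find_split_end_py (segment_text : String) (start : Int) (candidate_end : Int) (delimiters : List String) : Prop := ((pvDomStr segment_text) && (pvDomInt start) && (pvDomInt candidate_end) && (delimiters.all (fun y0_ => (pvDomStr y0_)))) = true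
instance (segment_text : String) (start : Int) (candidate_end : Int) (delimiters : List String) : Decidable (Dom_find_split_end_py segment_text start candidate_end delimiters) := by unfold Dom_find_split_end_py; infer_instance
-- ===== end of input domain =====

-- B replaces A's two backward scans by one backward scan (delimiter returns at once,
-- rightmost whitespace remembered as fallback); objective: alternative single-pass decomposition.

-- ===== PORT A =====
-- first loop of A: scan the positions, return the first whose char is in the delimiter set
-- (an out-of-range index, where Python raises IndexError, is skipped; Pre_ excludes such inputs)
def pvALoop1 (s : String) (dset : PySem.Set String) : List Int → Option Int
  | [] => none
  | pos :: rest =>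
    match PySem.Str.pyGet? s (pos - 1) with
    | some c => if dset.contains (String.ofList [c]) then some pos else pvALoop1 s dset rest
    | none => pvALoop1 s dset rest

-- second loop of A: first position whose char is whitespace
def pvALoop2 (s : String) : List Int → Option Int
  | [] => none
  | pos :: rest =>
    match PySem.Str.pyGet? s (pos - 1) with
    | some c => if PySem.Chars.isspace c then some pos else pvALoop2 s rest
    | none => pvALoop2 s rest

def find_split_end_py (segment_text : String) (start : Int) (candidate_end : Int) (delimiters : List String) : Int :=
  let dset := PySem.Set.ofList delimiters
  let r := PySem.List.pyRange candidate_end start (-1)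
  match pvALoop1 segment_text dset r with
  | some pos => pos
  | none =>
    match pvALoop2 segment_text r with
    | some pos => pos
    | none => candidate_end

-- ===== PORT B =====
-- single scan: return on a delimiter at once, remember the first (rightmost) whitespace
def pvBLoop (s : String) (dset : PySem.Set String) (ce : Int) (ws : Option Int) : List Int → Int
  | [] => ws.getD ce
  | pos :: rest =>
    match PySem.Str.pyGet? s (pos - 1) with
    | some c =>
      if dset.contains (String.ofList [c]) then pos
      else pvBLoop s dset ce (if ws.isNone && PySem.Chars.isspace c then some pos else ws) rest
    | none => pvBLoop s dset ce ws rest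

def find_split_end_py_alt (segment_text : String) (start : Int) (candidate_end : Int) (delimiters : List String) : Int :=
  let dset := PySem.Set.ofList delimiters
  pvBLoop segment_text dset candidate_end none (PySem.List.pyRange candidate_end start (-1))

-- ===== PRECONDITION & SPEC =====
-- Pre_ admits the empty scan range, and otherwise requires every scanned index
-- start..candidate_end-1 to be a valid (possibly negative, Python-wrapping) index of the
-- string; outside this A generally raises IndexError, though on a few excluded inputs A
-- still returns because it hits a delimiter/whitespace before reaching the bad index.
def Pre_find_split_end_py (segment_text : String) (start : Int) (candidate_end : Int) (delimiters : List String) : Prop :=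
  candidate_end ≤ start ∨ (-(segment_text.length : Int) ≤ start ∧ candidate_end ≤ (segment_text.length : Int))
instance (segment_text : String) (start : Int) (candidate_end : Int) (delimiters : List String) : Decidable (Pre_find_split_end_py segment_text start candidate_end delimiters) := by unfold Pre_find_split_end_py; infer_instance

def pvWitness_find_split_end_py : String × Int × Int × List String := ("a b.", 0, 4, [","])

def Spec_find_split_end_py (segment_text : String) (start : Int) (candidate_end : Int) (delimiters : List String) (out : Int) : Prop := out = find_split_end_py_alt segment_text start candidate_end delimiters
instance (segment_text : String) (start : Int) (candidate_end : Int) (delimiters : List String) (out : Int) : Decidable (Spec_find_split_end_py segment_text start candidate_end delimiters out) := by unfold Spec_find_split_end_py; infer_instance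

-- ===== CLAIM (what is proved, stated in full; the proofs are below) =====
def Claim_equal_find_split_end_py : Prop := ∀ (segment_text : String) (start : Int) (candidate_end : Int) (delimiters : List String), Dom_find_split_end_py segment_text start candidate_end delimiters → Pre_find_split_end_py segment_text start candidate_end delimiters → Spec_find_split_end_py segment_text start candidate_end delimiters (find_split_end_py segment_text start candidate_end delimiters)

-- ===== LEMMAS AND PROOFS =====

-- one scan of B equals: A's delimiter scan if it hits, else the remembered whitespace,
-- else A's whitespace scan, else the fallback
theorem pvBLoop_eq (s : String) (dset : PySem.Set String) (ce : Int) :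
    ∀ (l : List Int) (ws : Option Int),
      pvBLoop s dset ce ws l =
        match pvALoop1 s dset l with
        | some pos => pos
        | none =>
          match ws with
          | some w => w
          | none =>
            match pvALoop2 s l with
            | some pos => pos
            | none => ce := by
  intro l
  induction l with
  | nil => intro ws; cases ws <;> simp [pvBLoop, pvALoop1, pvALoop2]
  | cons pos rest ih =>
    intro ws
    simp only [pvBLoop, pvALoop1, pvALoop2]
    cases hg : PySem.Str.pyGet? s (pos - 1) with
    | none => exact ih ws
    | some c =>
      dsimp only
      by_cases hd : dset.contains (String.ofList [c]) = true
      · rw [if_pos hd, if_pos hd]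
      · rw [if_neg hd, if_neg hd, ih]
        cases ws with
        | some w => rfl
        | none =>
          by_cases hs : PySem.Chars.isspace c = true
          · rw [if_pos (by simp [hs]), if_pos hs]
          · rw [if_neg (by simp [hs]), if_neg hs]

-- ===== VERDICT (by name: the statement is the Claim_ definition above) =====
theorem find_split_end_py_spec : Claim_equal_find_split_end_py := by
  intro s st ce ds _ _
  unfold Spec_find_split_end_py find_split_end_py find_split_end_py_alt
  rw [pvBLoop_eq]
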